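-- pv_equiv track=rewrite | github.com/camicodina/TP-Grupal1-AlgoritmosIGuarna | panel_de_funciones.py | funcion_codigo
-- ===== SOURCE A (Python) =====
-- def funcion_codigo(lista):
--     """[Autor: Daniela Bolivar]
--        [Ayuda: Dada una línea, analiza el código perteneciente a la función que se encuentra en ella.
--        Es decir, la cantidad de 'returns', 'if', 'for','while', 'breaks', 'exit']
--     """
--
--     c_returns=0
--     c_if=0
--     c_for=0
--     c_while=0
--     c_break=0
--     c_exit=0
--
--     for i in range (3, len(lista)):
--         if 'if ' in lista[i] or 'elif ' in lista[i]:
--             c_if+=1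
--
--         elif 'for ' in lista[i]:
--             c_for+=1
--
--         elif 'while ' in lista[i]:
--             c_while+=1
--
--         elif 'break' in lista[i]:
--             c_break+=1
--
--         elif 'exit' in lista[i]:
--             c_exit+=1
--
--         elif 'return 'in lista[i]:
--             c_returns+=1
--
--     return [c_returns, c_if, c_for, c_while, c_break, c_exit]
-- ===== SOURCE B (Python) =====
-- def funcion_codigo(lista):
--     body = lista[3:]
--     tests = [lambda l: 'if ' in l or 'elif ' in l,
--              lambda l: 'for ' in l,
--              lambda l: 'while ' in l,
--              lambda l: 'break' in l,
--              lambda l: 'exit' in l,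
--              lambda l: 'return ' in l]
--
--     def count(k):
--         # lines matching group k and no higher-priority group (the elif cutoff)
--         return sum(1 for line in body
--                    if tests[k](line) and not any(t(line) for t in tests[:k]))
--
--     return [count(5), count(0), count(1), count(2), count(3), count(4)]
-- ===== Notes on version B (the rewrite author's own statement) =====
-- stated objective: alternative
-- what changed: Replaces A's single stateful pass with an if/elif chain over six mutable counters by six independent stateless counting passes, each counting lines that match its group's pattern and no higher-priority group's pattern.
import Mathlib
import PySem

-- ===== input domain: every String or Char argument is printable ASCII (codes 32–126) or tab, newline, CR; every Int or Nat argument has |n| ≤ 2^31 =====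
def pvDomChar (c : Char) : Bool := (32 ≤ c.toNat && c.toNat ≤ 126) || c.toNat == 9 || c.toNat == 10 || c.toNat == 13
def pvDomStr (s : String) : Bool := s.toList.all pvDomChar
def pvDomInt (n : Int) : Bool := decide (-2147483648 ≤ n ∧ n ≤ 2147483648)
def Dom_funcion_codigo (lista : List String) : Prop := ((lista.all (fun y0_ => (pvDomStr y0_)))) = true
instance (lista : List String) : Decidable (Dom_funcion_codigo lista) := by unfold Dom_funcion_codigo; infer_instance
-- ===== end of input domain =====

-- B replaces A's single stateful pass (if/elif chain over six mutable counters) by six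
-- independent stateless counting passes, each counting lines matching its group's pattern
-- and no higher-priority pattern (alternative decomposition; same cost).

-- ===== PORT A =====
def funcion_codigo (lista : List String) : List Int :=
  let s :=
    (lista.drop 3).foldl (fun (s : Int × Int × Int × Int × Int × Int) line =>
      let (cr, ci, cf, cw, cb, ce) := s
      if PySem.Str.isIn "if " line || PySem.Str.isIn "elif " line then (cr, ci + 1, cf, cw, cb, ce)
      else if PySem.Str.isIn "for " line then (cr, ci, cf + 1, cw, cb, ce)
      else if PySem.Str.isIn "while " line then (cr, ci, cf, cw + 1, cb, ce)
      else if PySem.Str.isIn "break" line then (cr, ci, cf, cw, cb + 1, ce)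
      else if PySem.Str.isIn "exit" line then (cr, ci, cf, cw, cb, ce + 1)
      else if PySem.Str.isIn "return " line then (cr + 1, ci, cf, cw, cb, ce)
      else (cr, ci, cf, cw, cb, ce)) (0, 0, 0, 0, 0, 0)
  [s.1, s.2.1, s.2.2.1, s.2.2.2.1, s.2.2.2.2.1, s.2.2.2.2.2]

-- ===== PORT B =====
def pvTests : List (String → Bool) :=
  [fun l => PySem.Str.isIn "if " l || PySem.Str.isIn "elif " l,
   fun l => PySem.Str.isIn "for " l,
   fun l => PySem.Str.isIn "while " l,
   fun l => PySem.Str.isIn "break" l,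
   fun l => PySem.Str.isIn "exit" l,
   fun l => PySem.Str.isIn "return " l]

-- count(k): lines matching group k and no higher-priority group (the elif cutoff)
def pvCount (body : List String) (k : Nat) : Int :=
  (body.countP (fun line =>
      (pvTests.getD k (fun _ => false)) line
        && !((pvTests.take k).any (fun t => t line))) : Int)

def funcion_codigo_alt (lista : List String) : List Int :=
  let body := lista.drop 3
  [pvCount body 5, pvCount body 0, pvCount body 1,
   pvCount body 2, pvCount body 3, pvCount body 4]

-- ===== PRECONDITION & SPEC =====
def Spec_funcion_codigo (lista : List String) (out : List Int) : Prop := out = funcion_codigo_alt lista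
instance (lista : List String) (out : List Int) : Decidable (Spec_funcion_codigo lista out) := by unfold Spec_funcion_codigo; infer_instance

-- ===== CLAIM (what is proved, stated in full; the proofs are below) =====
def Claim_equal_funcion_codigo : Prop := ∀ (lista : List String), Dom_funcion_codigo lista → Spec_funcion_codigo lista (funcion_codigo lista)

-- ===== LEMMAS AND PROOFS =====

theorem pv_loop_eq (l : List String) : ∀ (cr ci cf cw cb ce : Int),
    (l.foldl (fun (s : Int × Int × Int × Int × Int × Int) line =>
      let (cr, ci, cf, cw, cb, ce) := s
      if PySem.Str.isIn "if " line || PySem.Str.isIn "elif " line then (cr, ci + 1, cf, cw, cb, ce)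
      else if PySem.Str.isIn "for " line then (cr, ci, cf + 1, cw, cb, ce)
      else if PySem.Str.isIn "while " line then (cr, ci, cf, cw + 1, cb, ce)
      else if PySem.Str.isIn "break" line then (cr, ci, cf, cw, cb + 1, ce)
      else if PySem.Str.isIn "exit" line then (cr, ci, cf, cw, cb, ce + 1)
      else if PySem.Str.isIn "return " line then (cr + 1, ci, cf, cw, cb, ce)
      else (cr, ci, cf, cw, cb, ce)) (cr, ci, cf, cw, cb, ce))
    = (cr + pvCount l 5, ci + pvCount l 0, cf + pvCount l 1,
       cw + pvCount l 2, cb + pvCount l 3, ce + pvCount l 4) := by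
  induction l with
  | nil => intro cr ci cf cw cb ce; simp [pvCount]
  | cons line rest ih =>
    intro cr ci cf cw cb ce
    simp only [List.foldl_cons]
    by_cases h1 : (PySem.Str.isIn "if " line || PySem.Str.isIn "elif " line) = true
    · simp only [h1, if_true]
      rw [ih]
      simp only [pvCount, pvTests, List.take, List.getD, List.getElem?_cons_succ,
        List.getElem?_cons_zero, Option.getD_some, List.any_cons, List.any_nil,
        List.countP_cons, h1, Bool.true_or, Bool.or_true, Bool.or_false, Bool.not_true,
        Bool.and_false, Bool.and_true, Bool.false_and, Bool.not_false, cond_true, cond_false,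
        decide_true, decide_false, if_true, if_false, Bool.false_eq_true, Prod.mk.injEq]
      refine ⟨by push_cast; ring, by push_cast; ring, by push_cast; ring,
              by push_cast; ring, by push_cast; ring, by push_cast; ring⟩
    · simp only [Bool.or_eq_true, not_or, Bool.not_eq_true] at h1
      obtain ⟨h1a, h1b⟩ := h1
      by_cases h2 : PySem.Str.isIn "for " line = true
      all_goals try simp only [Bool.not_eq_true] at h2
      · simp only [h1a, h1b, h2, Bool.or_false, Bool.false_eq_true, if_false, if_true]
        rw [ih]
        simp only [pvCount, pvTests, List.take, List.getD, List.getElem?_cons_succ,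
          List.getElem?_cons_zero, Option.getD_some, List.any_cons, List.any_nil,
          List.countP_cons, h1a, h1b, h2, Bool.true_or, Bool.or_true, Bool.or_false,
          Bool.false_or, Bool.not_true, Bool.and_false, Bool.and_true, Bool.false_and,
          Bool.true_and, Bool.not_false, if_true, if_false, Bool.false_eq_true, Prod.mk.injEq]
        refine ⟨by push_cast; ring, by push_cast; ring, by push_cast; ring,
                by push_cast; ring, by push_cast; ring, by push_cast; ring⟩
      · by_cases h3 : PySem.Str.isIn "while " line = true
        all_goals try simp only [Bool.not_eq_true] at h3
        · simp only [h1a, h1b, h2, h3, Bool.or_false, Bool.false_eq_true, if_false, if_true]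
          rw [ih]
          simp only [pvCount, pvTests, List.take, List.getD, List.getElem?_cons_succ,
            List.getElem?_cons_zero, Option.getD_some, List.any_cons, List.any_nil,
            List.countP_cons, h1a, h1b, h2, h3, Bool.true_or, Bool.or_true, Bool.or_false,
            Bool.false_or, Bool.not_true, Bool.and_false, Bool.and_true, Bool.false_and,
            Bool.true_and, Bool.not_false, if_true, if_false, Bool.false_eq_true, Prod.mk.injEq]
          refine ⟨by push_cast; ring, by push_cast; ring, by push_cast; ring,
                  by push_cast; ring, by push_cast; ring, by push_cast; ring⟩
        · by_cases h4 : PySem.Str.isIn "break" line = true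
          all_goals try simp only [Bool.not_eq_true] at h4
          · simp only [h1a, h1b, h2, h3, h4, Bool.or_false, Bool.false_eq_true, if_false, if_true]
            rw [ih]
            simp only [pvCount, pvTests, List.take, List.getD, List.getElem?_cons_succ,
              List.getElem?_cons_zero, Option.getD_some, List.any_cons, List.any_nil,
              List.countP_cons, h1a, h1b, h2, h3, h4, Bool.true_or, Bool.or_true, Bool.or_false,
              Bool.false_or, Bool.not_true, Bool.and_false, Bool.and_true, Bool.false_and,
              Bool.true_and, Bool.not_false, if_true, if_false, Bool.false_eq_true, Prod.mk.injEq]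
            refine ⟨by push_cast; ring, by push_cast; ring, by push_cast; ring,
                    by push_cast; ring, by push_cast; ring, by push_cast; ring⟩
          · by_cases h5 : PySem.Str.isIn "exit" line = true
            all_goals try simp only [Bool.not_eq_true] at h5
            · simp only [h1a, h1b, h2, h3, h4, h5, Bool.or_false, Bool.false_eq_true, if_false, if_true]
              rw [ih]
              simp only [pvCount, pvTests, List.take, List.getD, List.getElem?_cons_succ,
                List.getElem?_cons_zero, Option.getD_some, List.any_cons, List.any_nil,
                List.countP_cons, h1a, h1b, h2, h3, h4, h5, Bool.true_or, Bool.or_true,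
                Bool.or_false, Bool.false_or, Bool.not_true, Bool.and_false, Bool.and_true,
                Bool.false_and, Bool.true_and, Bool.not_false, if_true, if_false,
                Bool.false_eq_true, Prod.mk.injEq]
              refine ⟨by push_cast; ring, by push_cast; ring, by push_cast; ring,
                      by push_cast; ring, by push_cast; ring, by push_cast; ring⟩
            · by_cases h6 : PySem.Str.isIn "return " line = true
              all_goals try simp only [Bool.not_eq_true] at h6
              · simp only [h1a, h1b, h2, h3, h4, h5, h6, Bool.or_false, Bool.false_eq_true,
                  if_false, if_true]
                rw [ih]
                simp only [pvCount, pvTests, List.take, List.getD, List.getElem?_cons_succ,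
                  List.getElem?_cons_zero, Option.getD_some, List.any_cons, List.any_nil,
                  List.countP_cons, h1a, h1b, h2, h3, h4, h5, h6, Bool.true_or, Bool.or_true,
                  Bool.or_false, Bool.false_or, Bool.not_true, Bool.and_false, Bool.and_true,
                  Bool.false_and, Bool.true_and, Bool.not_false, if_true, if_false,
                  Bool.false_eq_true, Prod.mk.injEq]
                refine ⟨by push_cast; ring, by push_cast; ring, by push_cast; ring,
                        by push_cast; ring, by push_cast; ring, by push_cast; ring⟩
              · simp only [h1a, h1b, h2, h3, h4, h5, h6, Bool.or_false, Bool.false_eq_true,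
                  if_false]
                rw [ih]
                simp only [pvCount, pvTests, List.take, List.getD, List.getElem?_cons_succ,
                  List.getElem?_cons_zero, Option.getD_some, List.any_cons, List.any_nil,
                  List.countP_cons, h1a, h1b, h2, h3, h4, h5, h6, Bool.or_false, Bool.false_or,
                  Bool.and_false, Bool.and_true, Bool.false_and, Bool.not_false, if_true,
                  if_false, Bool.false_eq_true, Prod.mk.injEq]
                exact ⟨rfl, rfl, rfl, rfl, rfl, rfl⟩

-- ===== VERDICT (by name: the statement is the Claim_ definition above) =====
theorem funcion_codigo_spec : Claim_equal_funcion_codigo := by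
  intro lista _
  unfold Spec_funcion_codigo funcion_codigo funcion_codigo_alt
  rw [pv_loop_eq (lista.drop 3) 0 0 0 0 0 0]
  simp
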